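-- pv_equiv track=rewrite | github.com/sshafer101/car_sales_negotiator | engine/llm_client.py | _detect_disallowed
-- ===== SOURCE A (Python) =====
-- def _detect_disallowed(text: str) -> bool:
--     lowered = text.lower()
--     disallowed = [
--         "race",
--         "religion",
--         "ethnicity",
--         "sexual",
--         "fake paystub",
--         "forge",
--         "fraud",
--         "lie on the credit",
--         "illegal",
--         "discriminate",
--         "deny service to",
--         "steal",
--         "threaten",
--         "harass",
--     ]
--     return any(x in lowered for x in disallowed)
-- ===== SOURCE B (Python) =====
-- def _detect_disallowed(text: str) -> bool:
--     lowered = text.lower()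
--     disallowed = (
--         "race",
--         "religion",
--         "ethnicity",
--         "sexual",
--         "fake paystub",
--         "forge",
--         "fraud",
--         "lie on the credit",
--         "illegal",
--         "discriminate",
--         "deny service to",
--         "steal",
--         "threaten",
--         "harass",
--     )
--     # single left-to-right sweep: at each position, does some term start here?
--     return any(
--         lowered.startswith(t, i)
--         for i in range(len(lowered) + 1)
--         for t in disallowed
--     )
-- ===== Notes on version B (the rewrite author's own statement) =====
-- stated objective: alternative
-- what changed: Replaced k independent substring-containment scans (any(x in lowered ...)) with one position-major left-to-right sweep that at each index asks whether any disallowed term starts there (startswith with a start offset).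
import Mathlib
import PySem

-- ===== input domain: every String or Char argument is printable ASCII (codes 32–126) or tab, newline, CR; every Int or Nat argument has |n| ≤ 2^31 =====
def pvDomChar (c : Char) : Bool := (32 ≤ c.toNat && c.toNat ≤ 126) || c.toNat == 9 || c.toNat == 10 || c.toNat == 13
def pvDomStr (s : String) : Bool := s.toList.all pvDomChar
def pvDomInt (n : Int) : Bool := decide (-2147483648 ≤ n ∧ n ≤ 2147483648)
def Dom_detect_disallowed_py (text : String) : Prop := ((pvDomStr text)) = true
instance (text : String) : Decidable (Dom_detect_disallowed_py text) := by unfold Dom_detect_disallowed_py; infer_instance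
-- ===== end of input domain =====

-- B replaces A's per-term containment scans with one position-major left-to-right
-- sweep checking at each index whether some disallowed term starts there (alternative
-- decomposition, same cost).

-- the constant term list both versions use
def pvDisallowed : List String :=
  ["race", "religion", "ethnicity", "sexual", "fake paystub", "forge", "fraud",
   "lie on the credit", "illegal", "discriminate", "deny service to", "steal",
   "threaten", "harass"]

-- ===== PORT A =====
def detect_disallowed_py (text : String) : Bool :=
  let lowered := PySem.Str.lower text
  pvDisallowed.any (fun x => PySem.Str.isIn x lowered)

-- ===== PORT B =====
-- Source B's `lowered.startswith(t, i)` with 0 ≤ i ≤ len(lowered) is exactly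
-- "t is a prefix of lowered[i:]", ported as Chars.startswith on the dropped list.
def detect_disallowed_py_alt (text : String) : Bool :=
  let lowered := (PySem.Str.lower text).toList
  (List.range (lowered.length + 1)).any (fun i =>
    pvDisallowed.any (fun t => PySem.Chars.startswith (lowered.drop i) t.toList))

-- ===== PRECONDITION & SPEC =====
def Spec_detect_disallowed_py (text : String) (out : Bool) : Prop := out = detect_disallowed_py_alt text
instance (text : String) (out : Bool) : Decidable (Spec_detect_disallowed_py text out) := by unfold Spec_detect_disallowed_py; infer_instance

-- ===== CLAIM (what is proved, stated in full; the proofs are below) =====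
def Claim_equal_detect_disallowed_py : Prop := ∀ (text : String), Dom_detect_disallowed_py text → Spec_detect_disallowed_py text (detect_disallowed_py text)

-- ===== LEMMAS AND PROOFS =====

-- "some term is an infix of s" = "at some position ≤ |s| some term starts"
theorem pv_any_isIn_eq_sweep (terms : List String) (s : List Char) :
    terms.any (fun x => PySem.Chars.isIn x.toList s)
      = (List.range (s.length + 1)).any (fun i =>
          terms.any (fun t => PySem.Chars.startswith (s.drop i) t.toList)) := by
  apply Bool.eq_iff_iff.mpr
  simp only [List.any_eq_true, List.mem_range, PySem.Chars.startswith_iff,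
    PySem.Chars.isIn_iff_infix]
  constructor
  · rintro ⟨t, ht, hinf⟩
    have hIn : PySem.Chars.isIn t.toList s = true := (PySem.Chars.isIn_iff_infix _ _).mpr hinf
    obtain ⟨j, hj⟩ := (PySem.Chars.exists_prefix_drop_iff_isIn t.toList s).mpr hIn
    by_cases hle : j ≤ s.length
    · exact ⟨j, Nat.lt_succ_of_le hle, t, ht, hj⟩
    · have hnil : s.drop j = [] := List.drop_eq_nil_of_le (le_of_lt (Nat.lt_of_not_le hle))
      have : t.toList <+: s.drop s.length := by
        simpa [hnil, List.drop_length] using hj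
      exact ⟨s.length, Nat.lt_succ_self _, t, ht, this⟩
  · rintro ⟨i, _, t, ht, hpre⟩
    exact ⟨t, ht, hpre.isInfix.trans (List.drop_suffix i s).isInfix⟩

-- ===== VERDICT (by name: the statement is the Claim_ definition above) =====
theorem detect_disallowed_py_spec : Claim_equal_detect_disallowed_py := by
  intro text _
  unfold Spec_detect_disallowed_py detect_disallowed_py detect_disallowed_py_alt
  simpa using pv_any_isIn_eq_sweep pvDisallowed (PySem.Str.lower text).toList
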